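-- pv_equiv track=rewrite | github.com/kodanda1/Projects | CSE_331/CC1/solution.py | win_loose
-- ===== SOURCE A (Python) =====
-- def win_loose(answers, questions):
--     """
--     solution
--     """
--     result = []
--     append = result.append
--     for i, j in questions:
--         new = answers[i: j+1]
--         count = new.count
--         if count(0) >= count(1):
--             append('Lose')
--         else:
--             append('Win')
--     return result
-- ===== SOURCE B (Python) =====
-- def win_loose(answers, questions):
--     """Prefix counts of zeros and ones built once; each query answered by subtraction."""
--     n = len(answers)
--     zeros = [0]
--     ones = [0]
--     cz = co = 0
--     for a in answers:
--         if a == 0: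
--             cz += 1
--         elif a == 1:
--             co += 1
--         zeros.append(cz)
--         ones.append(co)
--     result = []
--     for i, j in questions:
--         lo = i + n if i < 0 else i
--         lo = 0 if lo < 0 else (n if lo > n else lo)
--         hi = j + 1
--         if hi < 0:
--             hi += n
--         hi = 0 if hi < 0 else (n if hi > n else hi)
--         if hi < lo:
--             hi = lo
--         if ones[hi] - ones[lo] > zeros[hi] - zeros[lo]:
--             result.append('Win')
--         else:
--             result.append('Lose')
--     return result
-- ===== Notes on version B (the rewrite author's own statement) =====
-- stated objective: alternative
-- what changed: Replaces the per-query slice-and-count (rescanning the subarray twice per question) with prefix-count lists of zeros and ones built in one pass, each query answered by two subtractions with Python's slice-clamping done arithmetically.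
import Mathlib
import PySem

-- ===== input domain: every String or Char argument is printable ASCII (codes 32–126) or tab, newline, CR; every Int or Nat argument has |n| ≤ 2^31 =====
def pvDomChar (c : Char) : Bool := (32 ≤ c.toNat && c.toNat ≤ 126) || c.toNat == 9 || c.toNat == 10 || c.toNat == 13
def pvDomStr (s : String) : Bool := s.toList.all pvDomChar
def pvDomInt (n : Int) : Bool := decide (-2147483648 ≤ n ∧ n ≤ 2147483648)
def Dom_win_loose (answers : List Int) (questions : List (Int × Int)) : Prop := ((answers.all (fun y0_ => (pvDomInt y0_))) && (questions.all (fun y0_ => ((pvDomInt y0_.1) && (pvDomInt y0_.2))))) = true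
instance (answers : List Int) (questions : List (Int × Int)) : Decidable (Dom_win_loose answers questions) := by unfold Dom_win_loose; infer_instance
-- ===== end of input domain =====

-- B replaces A's per-query slice-and-count with prefix-count lists of zeros and ones built once; each query is answered by subtraction (a different algorithm; not measured faster on the probe's workload).


-- ===== PORT A =====
def win_loose (answers : List Int) (questions : List (Int × Int)) : List String :=
  questions.foldl (fun result q =>
    let new := PySem.List.slice answers (some q.1) (some (q.2 + 1))
    if new.count 1 ≤ new.count 0 then result ++ ["Lose"] else result ++ ["Win"]) []

-- ===== PORT B =====
-- one pass over answers building the two prefix-count lists (Source B's first loop)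
def prefixLoop (answers : List Int) : List Int × List Int × Int × Int :=
  answers.foldl (fun s a =>
    let cz := if a = 0 then s.2.2.1 + 1 else s.2.2.1
    let co := if a = 0 then s.2.2.2 else if a = 1 then s.2.2.2 + 1 else s.2.2.2
    (s.1 ++ [cz], s.2.1 ++ [co], cz, co)) ([0], [0], 0, 0)

def win_loose_alt (answers : List Int) (questions : List (Int × Int)) : List String :=
  let n : Int := answers.length
  let s := prefixLoop answers
  let zeros := s.1
  let ones := s.2.1
  questions.foldl (fun result q =>
    let lo1 := if q.1 < 0 then q.1 + n else q.1
    let lo := if lo1 < 0 then 0 else if lo1 > n then n else lo1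
    let hi1 := q.2 + 1
    let hi2 := if hi1 < 0 then hi1 + n else hi1
    let hi3 := if hi2 < 0 then 0 else if hi2 > n then n else hi2
    let hi := if hi3 < lo then lo else hi3
    if zeros.getD hi.toNat 0 - zeros.getD lo.toNat 0 < ones.getD hi.toNat 0 - ones.getD lo.toNat 0
    then result ++ ["Win"] else result ++ ["Lose"]) []

-- ===== PRECONDITION & SPEC =====
def Spec_win_loose (answers : List Int) (questions : List (Int × Int)) (out : List String) : Prop := out = win_loose_alt answers questions
instance (answers : List Int) (questions : List (Int × Int)) (out : List String) : Decidable (Spec_win_loose answers questions out) := by unfold Spec_win_loose; infer_instance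

-- ===== CLAIM (what is proved, stated in full; the proofs are below) =====
def Claim_equal_win_loose : Prop := ∀ (answers : List Int) (questions : List (Int × Int)), Dom_win_loose answers questions → Spec_win_loose answers questions (win_loose answers questions)

-- ===== LEMMAS AND PROOFS =====

-- the prefix loop computes exactly the prefix counts of 0 and 1
theorem prefixLoop_eq (ans : List Int) :
    prefixLoop ans =
      ((List.range (ans.length + 1)).map (fun t => ((ans.take t).count 0 : Int)),
       (List.range (ans.length + 1)).map (fun t => ((ans.take t).count 1 : Int)),
       (ans.count 0 : Int), (ans.count 1 : Int)) := by
  unfold prefixLoop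
  induction ans using List.reverseRecOn with
  | nil => simp
  | append_singleton l a ih =>
      rw [List.foldl_concat, ih]
      have hmap : ∀ (v : Int),
          (List.range (l.length + 1)).map (fun t => (((l ++ [a]).take t).count v : Int)) =
          (List.range (l.length + 1)).map (fun t => ((l.take t).count v : Int)) := by
        intro v
        apply List.map_congr_left
        intro t ht
        have : t ≤ l.length := by
          have := List.mem_range.mp ht; omega
        rw [List.take_append_of_le_length this]
      have htake : ∀ (v : Int), (((l ++ [a]).take (l.length + 1)).count v : Int) =
          (l.count v : Int) + (if a = v then 1 else 0) := by
        intro v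
        rw [List.take_of_length_le (by simp)]
        rw [List.count_append]
        by_cases h : a = v <;> simp [h]
      simp only [List.length_append, List.length_singleton, Prod.mk.injEq]
      refine ⟨?_, ?_, ?_, ?_⟩
      · conv_rhs => rw [List.range_succ]
        rw [List.map_append, hmap 0]
        congr 1
        simp only [List.map_cons, List.map_nil]
        rw [htake 0]
        by_cases h : a = 0 <;> simp [h]
      · conv_rhs => rw [List.range_succ]
        rw [List.map_append, hmap 1]
        congr 1
        simp only [List.map_cons, List.map_nil]
        rw [htake 1]
        by_cases h0 : a = 0
        · simp [h0]
        · by_cases h1 : a = 1 <;> simp [h0, h1]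
      · by_cases h : a = 0 <;> simp [h]
      · by_cases h0 : a = 0
        · simp [h0]
        · by_cases h1 : a = 1 <;> simp [h0, h1]

-- reading the prefix list at k ≤ n
theorem prefix_getD (ans : List Int) (v : Int) (k : Nat) (hk : k ≤ ans.length) :
    ((List.range (ans.length + 1)).map (fun t => ((ans.take t).count v : Int))).getD k 0 =
      ((ans.take k).count v : Int) := by
  rw [List.getD_eq_getElem?_getD]
  rw [List.getElem?_map, List.getElem?_range (by omega)]
  rfl

-- B's arithmetic clamp equals PySem's clampIdx
theorem clamp_eq (n : Nat) (a : Int) :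
    (if (if a < 0 then a + n else a) < 0 then 0
     else if (if a < 0 then a + n else a) > (n : Int) then (n : Int)
     else (if a < 0 then a + n else a)) = ((PySem.List.clampIdx n a : Nat) : Int) := by
  unfold PySem.List.clampIdx
  split_ifs <;> omega

-- count over a Python slice as a difference of prefix counts
theorem count_slice (ans : List Int) (i j v : Int) :
    ((PySem.List.slice ans (some i) (some (j + 1))).count v : Int) =
      ((ans.take (max (PySem.List.clampIdx ans.length i) (PySem.List.clampIdx ans.length (j + 1)))).count v : Int) -
      ((ans.take (PySem.List.clampIdx ans.length i)).count v : Int) := by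
  set L := PySem.List.clampIdx ans.length i with hL
  set C := PySem.List.clampIdx ans.length (j + 1) with hC
  have hslice : PySem.List.slice ans (some i) (some (j + 1)) = (ans.drop L).take (C - L) := by
    simp [PySem.List.slice, hL, hC]
  rw [hslice]
  by_cases hcl : C ≤ L
  · have : C - L = 0 := by omega
    rw [this, max_eq_left hcl]
    simp
  · have hlc : L ≤ C := by omega
    rw [max_eq_right hlc]
    have hLlen : L ≤ ans.length := PySem.List.clampIdx_le ans.length i
    have hsplit : ans.take C = ans.take L ++ (ans.drop L).take (C - L) := by
      conv_lhs => rw [← List.take_append_drop L ans]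
      rw [List.take_append]
      congr 1
      · rw [List.take_take, min_eq_right hlc]
      · congr 1
        rw [List.length_take, min_eq_left hLlen]
    rw [hsplit, List.count_append]
    push_cast
    ring

-- per-question agreement packaged as equality of the two fold steps
theorem step_eq (ans : List Int) (r : List String) (q : Int × Int) :
    (let new := PySem.List.slice ans (some q.1) (some (q.2 + 1))
     if new.count 1 ≤ new.count 0 then r ++ ["Lose"] else r ++ ["Win"]) =
    (let n : Int := ans.length
     let s := prefixLoop ans
     let zeros := s.1
     let ones := s.2.1
     let lo1 := if q.1 < 0 then q.1 + n else q.1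
     let lo := if lo1 < 0 then 0 else if lo1 > n then n else lo1
     let hi1 := q.2 + 1
     let hi2 := if hi1 < 0 then hi1 + n else hi1
     let hi3 := if hi2 < 0 then 0 else if hi2 > n then n else hi2
     let hi := if hi3 < lo then lo else hi3
     if zeros.getD hi.toNat 0 - zeros.getD lo.toNat 0 < ones.getD hi.toNat 0 - ones.getD lo.toNat 0
     then r ++ ["Win"] else r ++ ["Lose"]) := by
  simp only [prefixLoop_eq]
  set L := PySem.List.clampIdx ans.length q.1 with hLdef
  set C := PySem.List.clampIdx ans.length (q.2 + 1) with hCdef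
  have hlo : (if (if q.1 < 0 then q.1 + (ans.length : Int) else q.1) < 0 then 0
      else if (if q.1 < 0 then q.1 + (ans.length : Int) else q.1) > (ans.length : Int) then (ans.length : Int)
      else (if q.1 < 0 then q.1 + (ans.length : Int) else q.1)) = ((L : Nat) : Int) := clamp_eq ans.length q.1
  have hhi : (if (if q.2 + 1 < 0 then q.2 + 1 + (ans.length : Int) else q.2 + 1) < 0 then 0
      else if (if q.2 + 1 < 0 then q.2 + 1 + (ans.length : Int) else q.2 + 1) > (ans.length : Int) then (ans.length : Int)
      else (if q.2 + 1 < 0 then q.2 + 1 + (ans.length : Int) else q.2 + 1)) = ((C : Nat) : Int) := clamp_eq ans.length (q.2 + 1)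
  simp only [hlo, hhi]
  have hmax : (if ((C : Nat) : Int) < ((L : Nat) : Int) then ((L : Nat) : Int) else ((C : Nat) : Int)) = ((max L C : Nat) : Int) := by
    split_ifs <;> omega
  rw [hmax]
  have hLle : L ≤ ans.length := PySem.List.clampIdx_le ans.length q.1
  have hCle : C ≤ ans.length := PySem.List.clampIdx_le ans.length (q.2 + 1)
  have htL : ((L : Nat) : Int).toNat = L := by omega
  have htH : ((max L C : Nat) : Int).toNat = max L C := by omega
  rw [htL, htH]
  rw [prefix_getD ans 0 L hLle, prefix_getD ans 1 L hLle,
      prefix_getD ans 0 (max L C) (by omega), prefix_getD ans 1 (max L C) (by omega)]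
  have h0 := count_slice ans q.1 q.2 0
  have h1 := count_slice ans q.1 q.2 1
  rw [← hLdef, ← hCdef] at h0 h1
  rw [← h0, ← h1]
  by_cases h : (PySem.List.slice ans (some q.1) (some (q.2 + 1))).count 1 ≤ (PySem.List.slice ans (some q.1) (some (q.2 + 1))).count 0
  · rw [if_pos h, if_neg (by omega)]
  · rw [if_neg h, if_pos (by omega)]

-- ===== VERDICT (by name: the statement is the Claim_ definition above) =====
theorem win_loose_spec : Claim_equal_win_loose := by
  intro answers questions hdom
  clear hdom
  unfold Spec_win_loose win_loose win_loose_alt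
  simp only []
  induction questions using List.reverseRecOn with
  | nil => rfl
  | append_singleton qs q ih =>
      rw [List.foldl_concat, List.foldl_concat, ih]
      exact step_eq answers _ q
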